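-- pv_equiv track=rewrite | github.com/AveryS00/HTB_UNI_2022 | AbraCryptabra/solution.py | verify_list
-- ===== SOURCE A (Python) =====
-- def verify_list(l):
--     # if l[-1] != 0:
--     #     return False
--
--     non_zero_seen = False
--
--     positive_success = True
--     for entry in l[:-1]:
--         if entry == 1:
--             non_zero_seen = True
--         if entry != 0 and entry != 1:
--             positive_success = False
--             break
--
--     negative_success = True
--     for entry in l[:-1]:
--         if entry == -1:
--             non_zero_seen = True
--         if entry != 0 and entry != -1:
--             negative_success = False
--             break
--
--     return (positive_success or negative_success) and non_zero_seen
-- ===== SOURCE B (Python) =====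
-- def verify_list(l):
--     has_one = False
--     has_neg_one = False
--     has_other = False
--     for entry in l[:-1]:
--         if entry == 1:
--             has_one = True
--         elif entry == -1:
--             has_neg_one = True
--         elif entry != 0:
--             has_other = True
--     return (has_one or has_neg_one) and not has_other and not (has_one and has_neg_one)
-- ===== Notes on version B (the rewrite author's own statement) =====
-- stated objective: simpler
-- what changed: Replaces A's two sequential break-out scans (positive and negative, sharing a non_zero_seen flag) by one single pass maintaining three flags (saw 1, saw -1, saw other nonzero) combined in a closing formula.
import Mathlib
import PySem

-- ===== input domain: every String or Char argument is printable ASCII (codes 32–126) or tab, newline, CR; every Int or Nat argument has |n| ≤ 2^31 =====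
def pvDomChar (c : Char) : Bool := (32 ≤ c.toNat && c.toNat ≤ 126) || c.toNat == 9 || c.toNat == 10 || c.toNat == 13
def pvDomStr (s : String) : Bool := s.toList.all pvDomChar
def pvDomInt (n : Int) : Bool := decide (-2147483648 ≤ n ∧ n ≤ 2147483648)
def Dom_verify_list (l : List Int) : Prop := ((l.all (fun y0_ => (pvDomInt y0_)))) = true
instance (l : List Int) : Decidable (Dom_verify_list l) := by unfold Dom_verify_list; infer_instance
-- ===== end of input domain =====

-- B replaces A's two sequential break-out scans by a single pass with three flags; objective: simpler.


-- ===== PORT A =====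
-- first loop of A: threads non_zero_seen, breaks at the first entry ∉ {0,1}
def pvPosLoop : List Int → Bool → Bool × Bool
  | [], nz => (nz, true)
  | e :: rest, nz =>
    let nz := if e = 1 then true else nz
    if e ≠ 0 ∧ e ≠ 1 then (nz, false) else pvPosLoop rest nz

-- second loop of A: threads non_zero_seen, breaks at the first entry ∉ {0,-1}
def pvNegLoop : List Int → Bool → Bool × Bool
  | [], nz => (nz, true)
  | e :: rest, nz =>
    let nz := if e = -1 then true else nz
    if e ≠ 0 ∧ e ≠ -1 then (nz, false) else pvNegLoop rest nz

def verify_list (l : List Int) : Bool :=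
  let pref := PySem.List.slice l none (some (-1))   -- l[:-1]
  let p := pvPosLoop pref false
  let q := pvNegLoop pref p.1
  (p.2 || q.2) && q.1

-- ===== PORT B =====
def pvStep (s : Bool × Bool × Bool) (e : Int) : Bool × Bool × Bool :=
  if e = 1 then (true, s.2.1, s.2.2)
  else if e = -1 then (s.1, true, s.2.2)
  else if e ≠ 0 then (s.1, s.2.1, true)
  else s

def verify_list_alt (l : List Int) : Bool :=
  let s := (PySem.List.slice l none (some (-1))).foldl pvStep (false, false, false)
  ((s.1 || s.2.1) && !s.2.2) && !(s.1 && s.2.1)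

-- ===== PRECONDITION & SPEC =====
def Spec_verify_list (l : List Int) (out : Bool) : Prop := out = verify_list_alt l
instance (l : List Int) (out : Bool) : Decidable (Spec_verify_list l out) := by unfold Spec_verify_list; infer_instance

-- ===== CLAIM (what is proved, stated in full; the proofs are below) =====
def Claim_equal_verify_list : Prop := ∀ (l : List Int), Dom_verify_list l → Spec_verify_list l (verify_list l)

-- ===== LEMMAS AND PROOFS =====

def pvInPos (e : Int) : Bool := e == 0 || e == 1
def pvInNeg (e : Int) : Bool := e == 0 || e == -1

theorem pvPosLoop_eq (xs : List Int) : ∀ nz, pvPosLoop xs nz =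
    (nz || (xs.takeWhile pvInPos).contains 1, xs.all pvInPos) := by
  induction xs with
  | nil => intro nz; simp [pvPosLoop]
  | cons e xs ih =>
    intro nz
    by_cases h0 : e = 0
    · subst h0
      simp [pvPosLoop, pvInPos, ih]
    · by_cases h1 : e = 1
      · subst h1
        simp [pvPosLoop, pvInPos, ih]
      · simp [pvPosLoop, pvInPos, h0, h1]

theorem pvNegLoop_eq (xs : List Int) : ∀ nz, pvNegLoop xs nz =
    (nz || (xs.takeWhile pvInNeg).contains (-1), xs.all pvInNeg) := by
  induction xs with
  | nil => intro nz; simp [pvNegLoop]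
  | cons e xs ih =>
    intro nz
    by_cases h0 : e = 0
    · subst h0
      simp [pvNegLoop, pvInNeg, ih]
    · by_cases h1 : e = -1
      · subst h1
        simp [pvNegLoop, pvInNeg, ih]
      · simp [pvNegLoop, pvInNeg, h0, h1]

theorem pvFold_eq (xs : List Int) : ∀ s : Bool × Bool × Bool,
    xs.foldl pvStep s
    = (s.1 || xs.contains 1, s.2.1 || xs.contains (-1),
       s.2.2 || xs.any (fun e => !(e == 0 || e == 1 || e == -1))) := by
  induction xs with
  | nil => intro s; simp
  | cons e xs ih =>
    intro s
    rw [List.foldl_cons, ih]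
    by_cases h1 : e = 1
    · subst h1; simp [pvStep]
    · by_cases hn : e = -1
      · subst hn; simp [pvStep, Bool.or_assoc]
      · by_cases h0 : e = 0
        · subst h0; simp [pvStep]
        · simp [pvStep, h1, hn, h0, Ne.symm h1, Ne.symm hn, Bool.or_assoc]

-- the part both lemmas reduce to, for the common prefix xs = l[:-1]
theorem pv_key (xs : List Int) :
    ((xs.all pvInPos || xs.all pvInNeg)
      && ((false || (xs.takeWhile pvInPos).contains 1) || (xs.takeWhile pvInNeg).contains (-1)))
    = (((xs.contains 1 || xs.contains (-1))
        && !(xs.any (fun e => !(e == 0 || e == 1 || e == -1))))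
       && !(xs.contains 1 && xs.contains (-1))) := by
  by_cases hP : xs.all pvInPos = true
  · have hw : xs.takeWhile pvInPos = xs := List.takeWhile_eq_self_iff.mpr (by
      intro a ha; exact (List.all_eq_true.mp hP) a ha)
    have hcn : (-1 : Int) ∉ xs := by
      intro h
      have := (List.all_eq_true.mp hP) _ h
      simp [pvInPos] at this
    have hho : ∀ a ∈ xs, ¬(!(a == 0 || a == 1 || a == -1)) = true := by
      intro a ha
      have := (List.all_eq_true.mp hP) a ha
      simp [pvInPos] at this ⊢
      rcases this with h | h <;> simp [h]
    have hTn : (-1 : Int) ∉ xs.takeWhile pvInNeg := by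
      intro h
      exact hcn ((List.takeWhile_sublist pvInNeg).mem h)
    simp [hP, hw, hcn, hTn]
    intro _ x hx hx0 hx1
    exact (by simpa using hho x hx : ¬x = 0 → ¬x = 1 → x = -1) hx0 hx1
  · by_cases hN : xs.all pvInNeg = true
    · have hw : xs.takeWhile pvInNeg = xs := List.takeWhile_eq_self_iff.mpr (by
        intro a ha; exact (List.all_eq_true.mp hN) a ha)
      have hc1 : (1 : Int) ∉ xs := by
        intro h
        have := (List.all_eq_true.mp hN) _ h
        simp [pvInNeg] at this
      have hho : ∀ a ∈ xs, ¬(!(a == 0 || a == 1 || a == -1)) = true := by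
        intro a ha
        have := (List.all_eq_true.mp hN) a ha
        simp [pvInNeg] at this ⊢
        rcases this with h | h <;> simp [h]
      have hT1 : (1 : Int) ∉ xs.takeWhile pvInPos := by
        intro h
        exact hc1 ((List.takeWhile_sublist pvInPos).mem h)
      simp [hN, hw, hc1, hT1, hP]
      intro _ x hx hx0 hx1
      exact (by simpa using hho x hx : ¬x = 0 → ¬x = 1 → x = -1) hx0 hx1
    · -- neither all-positive nor all-negative: both sides false
      rw [Bool.not_eq_true] at hP hN
      rw [hP, hN]
      obtain ⟨a, ha, hpa⟩ := List.all_eq_false.mp hP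
      obtain ⟨b, hb, hnb⟩ := List.all_eq_false.mp hN
      simp [pvInPos] at hpa
      simp [pvInNeg] at hnb
      by_cases ham : a = -1
      · by_cases hbm : b = 1
        · -- both 1 and -1 occur: the right conjunct is false
          have h1 : (1 : Int) ∈ xs := hbm ▸ hb
          have hm1 : (-1 : Int) ∈ xs := ham ▸ ha
          simp [h1, hm1]
        · -- b is an "other" entry, so the !any conjunct is false
          simp
          intro _ hall
          exact absurd (hall b hb hnb.1 hbm) hnb.2
      · -- a is an "other" entry, so the !any conjunct is false
        simp
        intro _ hall
        exact absurd (hall a ha hpa.1 hpa.2) ham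

-- ===== VERDICT (by name: the statement is the Claim_ definition above) =====
theorem verify_list_spec : Claim_equal_verify_list := by
  intro l _
  unfold Spec_verify_list
  simp only [verify_list, verify_list_alt, PySem.List.slice_to_neg_one,
    pvPosLoop_eq, pvNegLoop_eq, pvFold_eq]
  simpa using pv_key l.dropLast
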